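-- pv_equiv track=rewrite | github.com/Felipe-Vilela/ProjetoPython-Hospital | sistemaHospital.py | verificarTel
-- ===== SOURCE A (Python) =====
-- def verificarTel(elemento):
--     lista_elemento = []
--
--     for i in range(len(elemento)):
--         lista_elemento.append(elemento[i])
--
--     elemento_verificado = ""
--
--     for i in lista_elemento:
--         if  "0" == i or "1" == i or "2" == i or "3" == i or "4" == i or "5" == i or "6" == i or "7" == i or "8" == i or "9" == i or "-" == i:
--             elemento_verificado += i
--         else:
--             return False
--
--     if elemento_verificado == elemento:
--         return True
--     else:
--         return False
-- ===== SOURCE B (Python) =====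
-- def verificarTel(elemento):
--     return set(elemento) <= set("0123456789-")
-- ===== Notes on version B (the rewrite author's own statement) =====
-- stated objective: idiomatic
-- what changed: Replaces A's two loops (copy chars to a list, then per-char allowed test with early return and rebuilding/comparing the string) by building the set of distinct characters once and doing a single subset comparison against the allowed set.
import Mathlib
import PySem

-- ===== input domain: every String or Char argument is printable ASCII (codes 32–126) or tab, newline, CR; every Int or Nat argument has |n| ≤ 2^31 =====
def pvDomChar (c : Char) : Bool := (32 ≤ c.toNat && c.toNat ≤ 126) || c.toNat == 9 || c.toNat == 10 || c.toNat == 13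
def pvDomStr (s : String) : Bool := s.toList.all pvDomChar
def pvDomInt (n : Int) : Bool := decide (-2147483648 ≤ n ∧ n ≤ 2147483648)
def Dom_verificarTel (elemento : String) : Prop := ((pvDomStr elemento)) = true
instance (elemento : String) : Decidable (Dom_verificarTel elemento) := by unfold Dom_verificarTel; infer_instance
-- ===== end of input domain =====

-- B replaces A's char-copy loop + early-return scan + string rebuild/compare by one subset test of distinct chars (idiomatic).

-- ===== PORT A =====
-- second loop of A: scan chars, accumulate verified chars, early False on a disallowed char,
-- then compare the accumulated string with the original
def verLoopA : List Char → List Char → List Char → Bool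
  | [], verificado, orig => verificado == orig
  | i :: rest, verificado, orig =>
    if '0' = i ∨ '1' = i ∨ '2' = i ∨ '3' = i ∨ '4' = i ∨ '5' = i ∨ '6' = i ∨ '7' = i ∨ '8' = i ∨ '9' = i ∨ '-' = i then
      verLoopA rest (verificado ++ [i]) orig
    else
      false

def verificarTel (elemento : String) : Bool :=
  -- first loop: lista_elemento collects elemento[i] for i in range(len(elemento))
  let lista_elemento := (List.range elemento.toList.length).foldl
    (fun acc (i : Nat) => acc ++ [(PySem.List.pyGet? elemento.toList (i : Int)).getD ' ']) []
  verLoopA lista_elemento [] elemento.toList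

-- ===== PORT B =====
def verificarTel_alt (elemento : String) : Bool :=
  PySem.Set.issubset (PySem.Set.ofList elemento.toList) (PySem.Set.ofList "0123456789-".toList)

-- ===== PRECONDITION & SPEC =====
def Spec_verificarTel (elemento : String) (out : Bool) : Prop := out = verificarTel_alt elemento
instance (elemento : String) (out : Bool) : Decidable (Spec_verificarTel elemento out) := by unfold Spec_verificarTel; infer_instance

-- ===== CLAIM (what is proved, stated in full; the proofs are below) =====
def Claim_equal_verificarTel : Prop := ∀ (elemento : String), Dom_verificarTel elemento → Spec_verificarTel elemento (verificarTel elemento)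

-- ===== LEMMAS AND PROOFS =====

def okChar (i : Char) : Bool := i ∈ ['0','1','2','3','4','5','6','7','8','9','-']

theorem verLoopA_char (l acc : List Char) :
    verLoopA l acc (acc ++ l) = l.all okChar := by
  induction l generalizing acc with
  | nil => simp [verLoopA]
  | cons i rest ih =>
    by_cases h : '0' = i ∨ '1' = i ∨ '2' = i ∨ '3' = i ∨ '4' = i ∨ '5' = i ∨ '6' = i ∨ '7' = i ∨ '8' = i ∨ '9' = i ∨ '-' = i
    · have hok : okChar i = true := by
        rcases h with h|h|h|h|h|h|h|h|h|h|h <;> rw [← h] <;> decide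
      have hsplit : acc ++ i :: rest = (acc ++ [i]) ++ rest := by simp
      rw [hsplit]
      show verLoopA (i :: rest) acc ((acc ++ [i]) ++ rest) = _
      simp only [verLoopA, if_pos h]
      rw [ih (acc ++ [i]), List.all_cons, hok, Bool.true_and]
    · have hok : okChar i = false := by
        simp only [not_or] at h
        simp only [okChar, List.mem_cons, List.not_mem_nil, or_false,
          decide_eq_false_iff_not, not_or]
        refine ⟨?_, ?_, ?_, ?_, ?_, ?_, ?_, ?_, ?_, ?_, ?_⟩ <;>
          (intro hx; first
            | exact h.1 hx.symm
            | exact h.2.1 hx.symm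
            | exact h.2.2.1 hx.symm
            | exact h.2.2.2.1 hx.symm
            | exact h.2.2.2.2.1 hx.symm
            | exact h.2.2.2.2.2.1 hx.symm
            | exact h.2.2.2.2.2.2.1 hx.symm
            | exact h.2.2.2.2.2.2.2.1 hx.symm
            | exact h.2.2.2.2.2.2.2.2.1 hx.symm
            | exact h.2.2.2.2.2.2.2.2.2.1 hx.symm
            | exact h.2.2.2.2.2.2.2.2.2.2 hx.symm)
      simp only [verLoopA, if_neg h, List.all_cons, hok, Bool.false_and]

theorem firstLoop_id (cs : List Char) :
    (List.range cs.length).foldl (fun acc (i : Nat) => acc ++ [(PySem.List.pyGet? cs (i : Int)).getD ' ']) [] = cs := by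
  have gen : ∀ (k n : Nat) (acc : List Char), n + k = cs.length →
      (List.range' n k).foldl (fun acc (i : Nat) => acc ++ [(PySem.List.pyGet? cs (i : Int)).getD ' ']) acc
        = acc ++ cs.drop n := by
    intro k
    induction k with
    | zero =>
      intro n acc h
      simp [List.drop_eq_nil_of_le (by omega : cs.length ≤ n)]
    | succ k ih =>
      intro n acc h
      have hlt : n < cs.length := by omega
      rw [List.range'_succ, List.foldl_cons, ih (n+1) _ (by omega)]
      have hget : PySem.List.pyGet? cs (n : Int) = some cs[n] := by
        simp [PySem.List.pyGet?_natCast, List.getElem?_eq_getElem hlt]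
      rw [hget, List.drop_eq_getElem_cons hlt]
      simp
  have := gen cs.length 0 [] (by omega)
  simpa [List.range_eq_range'] using this

theorem alt_eq_all (cs : List Char) :
    PySem.Set.issubset (PySem.Set.ofList cs) (PySem.Set.ofList "0123456789-".toList) = cs.all okChar := by
  rw [Bool.eq_iff_iff, PySem.Set.issubset_iff, List.all_eq_true]
  constructor
  · intro h x hx
    have := h x ((PySem.Set.mem_ofList _ _).mpr hx)
    simp only [okChar]
    simpa [PySem.Set.mem_ofList _ _] using this
  · intro h x hx
    have := h x ((PySem.Set.mem_ofList _ _).mp hx)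
    simp only [okChar, decide_eq_true_eq] at this
    apply (PySem.Set.mem_ofList _ _).mpr
    simpa using this

-- ===== VERDICT =====
theorem verificarTel_spec : Claim_equal_verificarTel := by
  intro elemento _
  unfold Spec_verificarTel verificarTel verificarTel_alt
  rw [firstLoop_id]
  have := verLoopA_char elemento.toList []
  simp only [List.nil_append] at this
  rw [this, alt_eq_all]
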